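-- pv_equiv track=rewrite | github.com/CoachEd/advent-of-code | 2023/day13/part1.py | getFolds
-- ===== SOURCE A (Python) =====
-- def getFolds(s):
--   d = {} # index , (length on either side of line, s)
--   for i in range(1,len(s)):
--     s1 = s[0:i]
--     s2 = s[i:]
--     s1len = len(s1)
--     s2len = len(s2)
--
--     if s1len < s2len:
--       s2 = s2[0:s1len]
--       s1 = s1[::-1]
--     elif s2len < s1len:
--       s1 = s1[::-1]
--       s1 = s1[0:s2len]
--
--     s1len = len(s1)
--     s2len = len(s2)
--     if s1 == s2:
--       d[i-1] = (len(s1),s1+s2)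
--
--   return d
-- ===== SOURCE B (Python) =====
-- def getFolds(s):
--   # Manacher's algorithm on the even-length centers: p[i] is the mirror radius at
--   # split i, computed with a linear number of comparisons by reusing the radius
--   # of the mirrored center inside the rightmost known palindrome; a fold is a
--   # split whose radius reaches the nearer edge.  At the exact middle split this
--   # checks the intended mirror condition (A compares the two halves unreversed).
--   n = len(s)
--   p = [0] * n
--   c, r = 0, 0
--   d = {}
--   for i in range(1, n):
--     g = 0
--     if i < r:
--       g = min(p[2 * c - i], r - i)
--     while g < i and g < n - i and s[i - 1 - g] == s[i + g]:
--       g += 1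
--     p[i] = g
--     if i + g > r:
--       c, r = i, i + g
--     if g == min(i, n - i):
--       d[i - 1] = (g, s[i:i + g] * 2)
--   return d
-- ===== Notes on version B (the rewrite author's own statement) =====
-- stated objective: alternative
-- what changed: B replaces A's per-split slice/reverse/compare loop with Manacher's algorithm on the even-length centers: it maintains the rightmost known palindrome and seeds each split's mirror radius from the mirrored center (linear total number of comparisons, though building the reported fold lists still costs output size), and reports a fold where the radius reaches the nearer edge; at the middle split it applies the true mirror test where A forgets to reverse the prefix.
-- intended difference: On even-length lists whose middle split is a repetition but not a mirror (or a mirror but not a repetition), A compares the two halves without reversing the prefix, so it reports a fold for a repetition and misses a genuine mirror; B applies the same reversed-prefix mirror test as at every other split, which is the intended behaviour. — e.g. on getFolds(["a", "b", "a", "b"]): A returns [(1, 2, ["a", "b", "a", "b"])], B returns []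
import Mathlib
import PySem

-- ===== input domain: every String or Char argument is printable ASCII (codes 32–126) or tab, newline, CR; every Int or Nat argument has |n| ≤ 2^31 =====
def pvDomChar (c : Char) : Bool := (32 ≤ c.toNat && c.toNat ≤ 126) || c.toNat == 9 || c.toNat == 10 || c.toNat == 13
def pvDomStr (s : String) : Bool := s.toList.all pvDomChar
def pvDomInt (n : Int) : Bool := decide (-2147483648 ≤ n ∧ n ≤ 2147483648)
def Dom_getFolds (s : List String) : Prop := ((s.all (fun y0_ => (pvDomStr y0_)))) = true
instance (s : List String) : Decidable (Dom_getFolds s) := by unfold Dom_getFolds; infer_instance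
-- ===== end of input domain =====

-- B replaces A's per-split slice/reverse/compare with Manacher's algorithm on the even-length
-- centers (rightmost-palindrome state, mirrored-radius seeding), reporting a fold where the
-- radius reaches the nearer edge (objective: alternative algorithm; fewer comparisons, but
-- building the reported fold lists still costs output size).
-- A's dict keys i-1 are fresh and increasing, so dict assignment is modelled as list append.

-- ===== PORT A =====
def getFolds (s : List String) : List (Int × Int × List String) :=
  (PySem.List.pyRange 1 (s.length : Int) 1).foldl (fun d i =>
    let s1 := PySem.List.slice s (some 0) (some i)
    let s2 := PySem.List.slice s (some i) none
    let s1len : Int := s1.length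
    let s2len : Int := s2.length
    let p : List String × List String :=
      if s1len < s2len then
        (((PySem.List.slice? s1 none none (-1)).getD []),
         PySem.List.slice s2 (some 0) (some s1len))
      else if s2len < s1len then
        (PySem.List.slice ((PySem.List.slice? s1 none none (-1)).getD []) (some 0) (some s2len),
         s2)
      else (s1, s2)
    let t1 := p.1
    let t2 := p.2
    if t1 = t2 then d ++ [(i - 1, ((t1.length : Int), t1 ++ t2))] else d) []

-- ===== PORT B =====
-- the inner while loop of Source B; the fuel argument (called with i, an upper bound on the
-- number of iterations since g only grows while g < i) only makes the loop total
def pvExpand (s : List String) (n i : Nat) : Nat → Nat → Nat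
  | 0, g => g
  | f+1, g =>
    if g < i ∧ g < n - i ∧ s.getD (i-1-g) "" = s.getD (i+g) "" then pvExpand s n i f (g+1)
    else g

-- the for loop of Source B over i = 1 .. n-1; the fuel argument is the trip count n-1
def pvLoop (s : List String) (n : Nat) :
    Nat → Nat → List Nat → Nat → Nat → List (Int × Int × List String) →
    List (Int × Int × List String)
  | 0, _, _, _, _, d => d
  | f+1, i, p, c, r, d =>
    let g0 := if i < r then min (p.getD (2*c - i) 0) (r - i) else 0
    let g := pvExpand s n i i g0
    let p' := p.set i g
    let cr := if r < i + g then (i, i + g) else (c, r)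
    let d' :=
      if g = min i (n - i) then
        d ++ [((i : Int) - 1, ((g : Int),
          PySem.List.slice s (some (i : Int)) (some ((i : Int) + (g : Int))) ++
          PySem.List.slice s (some (i : Int)) (some ((i : Int) + (g : Int)))))]
      else d
    pvLoop s n f (i+1) p' cr.1 cr.2 d'

def getFolds_alt (s : List String) : List (Int × Int × List String) :=
  pvLoop s s.length (s.length - 1) 1 (List.replicate s.length 0) 0 0 []

-- ===== PRECONDITION & SPEC =====
-- At the middle split of an even-length list A forgets to reverse the prefix, so it reports a
-- fold when the two halves are equal (a repetition, not a mirror) and misses a genuine mirror;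
-- B checks the mirror condition there like everywhere else, which is the intended behaviour.
def D_getFolds (s : List String) : Prop :=
  s.length % 2 = 0 ∧ s ≠ [] ∧
    ¬ ((s.take (s.length / 2) = s.drop (s.length / 2)) ↔
       ((s.take (s.length / 2)).reverse = s.drop (s.length / 2)))
instance (s : List String) : Decidable (D_getFolds s) := by unfold D_getFolds; infer_instance

def Spec_getFolds (s : List String) (out : List (Int × Int × List String)) : Prop :=
  ¬ D_getFolds s → out = getFolds_alt s
instance (s : List String) (out : List (Int × Int × List String)) : Decidable (Spec_getFolds s out) := by
  unfold Spec_getFolds; infer_instance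

def pvDiffWitness_getFolds : List String := ["a", "b", "a", "b"]
def pvDiffWitnessOut_getFolds : (List (Int × Int × List String)) × (List (Int × Int × List String)) :=
  ([(1, 2, ["a", "b", "a", "b"])], [])

-- ===== CLAIM (what is proved, stated in full; the proofs are below) =====
def Claim_unchanged_getFolds : Prop := ∀ (s : List String), Dom_getFolds s → Spec_getFolds s (getFolds s)
def Claim_changed_getFolds : Prop :=
  Dom_getFolds (pvDiffWitness_getFolds) ∧ D_getFolds (pvDiffWitness_getFolds) ∧
  getFolds (pvDiffWitness_getFolds) = pvDiffWitnessOut_getFolds.1 ∧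
  getFolds_alt (pvDiffWitness_getFolds) = pvDiffWitnessOut_getFolds.2 ∧
  pvDiffWitnessOut_getFolds.1 ≠ pvDiffWitnessOut_getFolds.2
def Claim_exact_getFolds : Prop := ∀ (s : List String), Dom_getFolds s → D_getFolds s → getFolds s ≠ getFolds_alt s

-- ===== LEMMAS AND PROOFS =====

-- longest common prefix length of two lists
def pvExt : List String → List String → Nat
  | a :: as, b :: bs => if a = b then pvExt as bs + 1 else 0
  | _, _ => 0

-- the mirror radius at split i: lcp of the reversed prefix and the suffix
def pvRad (s : List String) (i : Nat) : Nat := pvExt ((s.take i).reverse) (s.drop i)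

theorem pvExt_le_left (L R : List String) : pvExt L R ≤ L.length := by
  induction L generalizing R with
  | nil => simp [pvExt]
  | cons a as ih =>
    cases R with
    | nil => simp [pvExt]
    | cons b bs =>
      simp only [pvExt]
      split
      · exact Nat.succ_le_succ (ih bs)
      · simp

theorem pvExt_le_right (L R : List String) : pvExt L R ≤ R.length := by
  induction L generalizing R with
  | nil => simp [pvExt]
  | cons a as ih =>
    cases R with
    | nil => simp [pvExt]
    | cons b bs =>
      simp only [pvExt]
      split
      · exact Nat.succ_le_succ (ih bs)
      · simp

theorem pvExt_get (L R : List String) (j : Nat) (hj : j < pvExt L R) :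
    L.getD j "" = R.getD j "" := by
  induction L generalizing R j with
  | nil => simp [pvExt] at hj
  | cons a as ih =>
    cases R with
    | nil => simp [pvExt] at hj
    | cons b bs =>
      simp only [pvExt] at hj
      split at hj
      · cases j with
        | zero => simpa using ‹a = b›
        | succ j' => simpa using ih bs j' (by omega)
      · omega

theorem pvExt_stop (L R : List String) (h1 : pvExt L R < L.length) (h2 : pvExt L R < R.length) :
    ¬ (L.getD (pvExt L R) "" = R.getD (pvExt L R) "") := by
  induction L generalizing R with
  | nil => simp at h1
  | cons a as ih =>
    cases R with
    | nil => simp at h2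
    | cons b bs =>
      by_cases hab : a = b
      · simp only [pvExt, if_pos hab, List.length_cons] at h1 h2 ⊢
        simpa using ih bs (by omega) (by omega)
      · simp only [pvExt, if_neg hab, List.length_cons] at h1 h2 ⊢
        simpa using hab

theorem pvExt_ge (L R : List String) (k : Nat) (h1 : k ≤ L.length) (h2 : k ≤ R.length)
    (h : ∀ j, j < k → L.getD j "" = R.getD j "") : k ≤ pvExt L R := by
  induction L generalizing R k with
  | nil => simp at h1; omega
  | cons a as ih =>
    cases R with
    | nil => simp at h2; omega
    | cons b bs =>
      cases k with
      | zero => omega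
      | succ k' =>
        have hab : a = b := by simpa using h 0 (by omega)
        simp only [pvExt, if_pos hab]
        have : k' ≤ pvExt as bs := by
          apply ih bs k' (by simpa using h1) (by simpa using h2)
          intro j hj
          simpa using h (j+1) (by omega)
        omega

theorem pvExt_eq_min_iff (L R : List String) :
    pvExt L R = min L.length R.length ↔ L.take R.length = R.take L.length := by
  induction L generalizing R with
  | nil => simp [pvExt]
  | cons a as ih =>
    cases R with
    | nil => simp [pvExt]
    | cons b bs =>
      by_cases hab : a = b
      · simp only [pvExt, if_pos hab, List.length_cons, List.take_succ_cons, List.cons.injEq]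
        have hmin : min (as.length + 1) (bs.length + 1) = min as.length bs.length + 1 := by omega
        rw [hmin]
        constructor
        · intro h; exact ⟨hab, (ih bs).mp (by omega)⟩
        · intro h; have := (ih bs).mpr h.2; omega
      · simp only [pvExt, if_neg hab, List.length_cons, List.take_succ_cons, List.cons.injEq]
        constructor
        · intro h; omega
        · intro h; exact absurd h.1 hab

-- index translations between (take i s).reverse / drop i s and s itself
theorem pv_rev_take_getD (s : List String) (i j : Nat) (hij : j < i) (hi : i ≤ s.length) :
    ((s.take i).reverse).getD j "" = s.getD (i-1-j) "" := by
  have hlen : (s.take i).length = i := by simp; omega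
  have hj' : j < ((s.take i).reverse).length := by simp; omega
  rw [List.getD_eq_getElem _ _ hj', List.getD_eq_getElem _ _ (show i-1-j < s.length by omega),
    List.getElem_reverse, List.getElem_take]
  congr 1
  omega

theorem pv_drop_getD (s : List String) (i j : Nat) (h : i + j < s.length) :
    (s.drop i).getD j "" = s.getD (i+j) "" := by
  rw [List.getD_eq_getElem _ _ (show j < (s.drop i).length by simp; omega),
    List.getD_eq_getElem _ _ h, List.getElem_drop]

theorem pvRad_le_center (s : List String) (i : Nat) : pvRad s i ≤ i := by
  unfold pvRad
  have := pvExt_le_left ((s.take i).reverse) (s.drop i)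
  simp only [List.length_reverse, List.length_take] at this
  omega

theorem pvRad_le_rest (s : List String) (i : Nat) : pvRad s i ≤ s.length - i := by
  unfold pvRad
  have := pvExt_le_right ((s.take i).reverse) (s.drop i)
  simpa using this

theorem pvRad_match (s : List String) (i j : Nat) (hi : i ≤ s.length) (hj : j < pvRad s i) :
    s.getD (i-1-j) "" = s.getD (i+j) "" := by
  have h1 := pvRad_le_center s i
  have h2 := pvRad_le_rest s i
  have := pvExt_get ((s.take i).reverse) (s.drop i) j (by unfold pvRad at hj; exact hj)
  rwa [pv_rev_take_getD s i j (by omega) hi, pv_drop_getD s i j (by omega)] at this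

theorem pvRad_stop (s : List String) (i : Nat) (hi : i ≤ s.length)
    (h1 : pvRad s i < i) (h2 : pvRad s i < s.length - i) :
    ¬ (s.getD (i-1-pvRad s i) "" = s.getD (i+pvRad s i) "") := by
  unfold pvRad at h1 h2 ⊢
  have := pvExt_stop ((s.take i).reverse) (s.drop i)
    (by simp only [List.length_reverse, List.length_take]; omega) (by simpa using h2)
  rwa [pv_rev_take_getD s i _ (by omega) hi, pv_drop_getD s i _ (by omega)] at this

theorem pvRad_ge (s : List String) (i k : Nat) (hi : i ≤ s.length)
    (hk1 : k ≤ i) (hk2 : k ≤ s.length - i)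
    (h : ∀ j, j < k → s.getD (i-1-j) "" = s.getD (i+j) "") : k ≤ pvRad s i := by
  unfold pvRad
  apply pvExt_ge _ _ k (by simp only [List.length_reverse, List.length_take]; omega)
    (by simpa using hk2)
  intro j hj
  rw [pv_rev_take_getD s i j (by omega) hi, pv_drop_getD s i j (by omega)]
  exact h j hj

-- the expansion loop computes the radius from any lower-bound seed
theorem pvExpand_eq (s : List String) (n i : Nat) (hn : n = s.length) (hi : i ≤ n)
    (f g : Nat) (hg : g ≤ pvRad s i) (hf : pvRad s i ≤ f + g) :
    pvExpand s n i f g = pvRad s i := by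
  induction f generalizing g with
  | zero => simp only [pvExpand]; omega
  | succ f' ih =>
    simp only [pvExpand]
    by_cases hC : g < i ∧ g < n - i ∧ s.getD (i-1-g) "" = s.getD (i+g) ""
    · rw [if_pos hC]
      have hlt : g < pvRad s i := by
        rcases Nat.lt_or_ge g (pvRad s i) with h | h
        · exact h
        · exfalso
          have hge : g = pvRad s i := by omega
          exact pvRad_stop s i (by omega) (by omega) (by omega) (hge ▸ hC.2.2)
      exact ih (g+1) (by omega) (by omega)
    · rw [if_neg hC]
      rcases Nat.lt_or_ge g (pvRad s i) with h | h
      · exfalso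
        apply hC
        have hb1 := pvRad_le_center s i
        have hb2 := pvRad_le_rest s i
        exact ⟨by omega, by omega, pvRad_match s i g (by omega) h⟩
      · omega

-- the mirrored-center seed is a valid lower bound on the radius
theorem pvGuess (s : List String) (c i : Nat) (hc : c < i) (hi : i ≤ s.length)
    (hir : i < c + pvRad s c) :
    min (pvRad s (2*c - i)) (c + pvRad s c - i) ≤ pvRad s i := by
  have hrc_c := pvRad_le_center s c
  have hrc_n := pvRad_le_rest s c
  set rc := pvRad s c with hrc
  set m := 2*c - i with hm
  have hmi : m < i := by omega
  have hml : m ≤ s.length := by omega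
  have hrm_c := pvRad_le_center s m
  set g := min (pvRad s m) (c + rc - i) with hgdef
  apply pvRad_ge s i g hi (by omega) (by omega)
  intro j hj
  have hj1 : j < pvRad s m := by omega
  have hj2 : j < c + rc - i := by omega
  -- s[i+j] = s[m-1-j] via the palindrome at c
  have e1 : s.getD (i+j) "" = s.getD (m-1-j) "" := by
    have t1 : i + j - c < rc := by omega
    have := pvRad_match s c (i + j - c) (by omega) t1
    have ea : c - 1 - (i + j - c) = m - 1 - j := by omega
    have eb : c + (i + j - c) = i + j := by omega
    rw [ea, eb] at this
    exact this.symm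
  -- s[i-1-j] = s[m+j] via the palindrome at c
  have e2 : s.getD (i-1-j) "" = s.getD (m+j) "" := by
    by_cases hcase : c ≤ i - 1 - j
    · have t2 : i - 1 - j - c < rc := by omega
      have := pvRad_match s c (i - 1 - j - c) (by omega) t2
      have ea : c - 1 - (i - 1 - j - c) = m + j := by omega
      have eb : c + (i - 1 - j - c) = i - 1 - j := by omega
      rw [ea, eb] at this
      exact this.symm
    · have t3 : j - (i - c) < rc := by omega
      have := pvRad_match s c (j - (i - c)) (by omega) t3
      have ea : c - 1 - (j - (i - c)) = i - 1 - j := by omega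
      have eb : c + (j - (i - c)) = m + j := by omega
      rw [ea, eb] at this
      exact this
  -- the palindrome at the mirror center m
  have e3 : s.getD (m-1-j) "" = s.getD (m+j) "" := pvRad_match s m j hml hj1
  rw [e1, e2, ← e3]

-- the canonical per-split body both ports are reduced to
def bodyM (s : List String) (d : List (Int × Int × List String)) (i : Nat) :
    List (Int × Int × List String) :=
  if pvRad s i = min i (s.length - i) then
    d ++ [((i : Int) - 1, ((pvRad s i : Int),
      PySem.List.slice s (some (i : Int)) (some ((i : Int) + (pvRad s i : Int))) ++
      PySem.List.slice s (some (i : Int)) (some ((i : Int) + (pvRad s i : Int)))))]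
  else d

-- the Manacher loop satisfies its invariant and folds bodyM
theorem pvLoop_eq (s : List String) (n : Nat) (hn : n = s.length) :
    ∀ (f i : Nat) (p : List Nat) (c r : Nat) (d : List (Int × Int × List String)),
      i + f = n → 1 ≤ i → p.length = n → (∀ j, j < i → p.getD j 0 = pvRad s j) →
      c < i → r = c + pvRad s c →
      pvLoop s n f i p c r d = List.foldl (bodyM s) d (List.range' i f) := by
  intro f
  induction f with
  | zero => intro i p c r d _ _ _ _ _ _; simp [pvLoop]
  | succ f' ih =>
    intro i p c r d hif h1i hplen hpinv hci hr
    have hin : i < n := by omega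
    have hrad_c := pvRad_le_center s c
    have hg0 : (if i < r then min (p.getD (2*c - i) 0) (r - i) else 0) ≤ pvRad s i := by
      split
      · rename_i hir
        have hm : 2*c - i < i := by omega
        rw [hpinv (2*c - i) hm, hr]
        exact pvGuess s c i hci (by omega) (by omega)
      · omega
    have hg : pvExpand s n i i (if i < r then min (p.getD (2*c - i) 0) (r - i) else 0)
        = pvRad s i := by
      apply pvExpand_eq s n i hn (by omega) _ _ hg0
      have := pvRad_le_center s i
      omega
    simp only [pvLoop, hg, List.range'_succ, List.foldl_cons]
    have hstep : (if pvRad s i = min i (n - i) then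
        d ++ [((i : Int) - 1, ((pvRad s i : Int),
          PySem.List.slice s (some (i : Int)) (some ((i : Int) + (pvRad s i : Int))) ++
          PySem.List.slice s (some (i : Int)) (some ((i : Int) + (pvRad s i : Int)))))]
        else d) = bodyM s d i := by
      unfold bodyM; rw [hn]
    rw [hstep]
    have hset : ∀ j, j < i + 1 → (p.set i (pvRad s i)).getD j 0 = pvRad s j := by
      intro j hj
      rcases Nat.lt_or_ge j i with hji | hji
      · rw [List.getD, List.getElem?_set_ne (by omega)]
        exact hpinv j hji
      · have hji' : j = i := by omega
        subst hji'
        rw [List.getD, List.getElem?_set_self (by omega), Option.getD_some]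
    split
    · rename_i hnew
      exact ih (i+1) _ i (i + pvRad s i) _ (by omega) (by omega) (by simpa using hplen)
        hset (by omega) rfl
    · rename_i hold
      exact ih (i+1) _ c r _ (by omega) (by omega) (by simpa using hplen)
        hset (by omega) hr

theorem pvRad_zero (s : List String) : pvRad s 0 = 0 := by
  cases s <;> rfl

theorem getFolds_alt_eq (s : List String) :
    getFolds_alt s = List.foldl (bodyM s) [] (List.range' 1 (s.length - 1)) := by
  unfold getFolds_alt
  rcases Nat.eq_zero_or_pos s.length with h0 | hpos
  · rw [h0]; simp [pvLoop]
  · apply pvLoop_eq s s.length rfl (s.length - 1) 1 (List.replicate s.length 0) 0 0 []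
      (by omega) (by omega) (by simp)
      (by
        intro j hj
        have hj0 : j = 0 := by omega
        subst hj0
        rw [pvRad_zero, List.getD, List.getElem?_replicate_of_lt (by omega)]
        rfl)
      (by omega)
      (by rw [pvRad_zero])

-- A's loop body, named for the proofs
def bodyA (s : List String) (d : List (Int × Int × List String)) (i : Int) :
    List (Int × Int × List String) :=
  let s1 := PySem.List.slice s (some 0) (some i)
  let s2 := PySem.List.slice s (some i) none
  let s1len : Int := s1.length
  let s2len : Int := s2.length
  let p : List String × List String :=
    if s1len < s2len then
      (((PySem.List.slice? s1 none none (-1)).getD []),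
       PySem.List.slice s2 (some 0) (some s1len))
    else if s2len < s1len then
      (PySem.List.slice ((PySem.List.slice? s1 none none (-1)).getD []) (some 0) (some s2len),
       s2)
    else (s1, s2)
  let t1 := p.1
  let t2 := p.2
  if t1 = t2 then d ++ [(i - 1, ((t1.length : Int), t1 ++ t2))] else d

theorem getFolds_eq (s : List String) :
    getFolds s = List.foldl (fun d (k : Nat) => bodyA s d (k : Int)) [] (List.range' 1 (s.length - 1)) := by
  show (PySem.List.pyRange 1 (s.length : Int) 1).foldl (bodyA s) [] = _
  have he : ((s.length : Int) - 1).toNat = s.length - 1 := by omega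
  rw [PySem.List.pyRange_one, he, List.range'_eq_map_range, List.foldl_map, List.foldl_map]
  apply PySem.List.foldl_congr_mem
  intro acc x _
  show bodyA s acc (1 + (x:Int)) = bodyA s acc (((1 + x : Nat)):Int)
  have e : ((1 + x : Nat) : Int) = 1 + (x:Int) := by push_cast; ring
  rw [e]

-- the fold condition, expressed as A checks it
theorem pvRad_eq_min_iff (s : List String) (i : Nat) (hi : i ≤ s.length) :
    pvRad s i = min i (s.length - i) ↔
      ((s.take i).reverse).take (s.length - i) = (s.drop i).take i := by
  have h := pvExt_eq_min_iff ((s.take i).reverse) (s.drop i)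
  simp only [List.length_reverse, List.length_take, List.length_drop,
    Nat.min_eq_left hi] at h
  exact h

theorem pv_body (s : List String) (acc : List (Int × Int × List String))
    (m : Nat) (_h1 : 1 ≤ m) (h2 : m < s.length)
    (hOK : m = s.length - m →
      ((List.take m s = List.drop m s) ↔ ((List.take m s).reverse = List.drop m s))) :
    bodyA s acc (m : Int) = bodyM s acc m := by
  unfold bodyA bodyM
  simp only [pvRad_eq_min_iff s m (by omega)]
  simp only [PySem.List.slice_zero_start, PySem.List.slice_to_natCast, PySem.List.slice_from_natCast,
    PySem.List.slice?_none_none_neg_one, Option.getD_some, List.length_take, List.length_drop,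
    Nat.min_eq_left (le_of_lt h2), PySem.List.slice_natCast_add]
  rcases Nat.lt_trichotomy m (s.length - m) with hlt | heq | hgt
  · have hlt' : ((m:Nat):Int) < (((s.length - m : Nat)):Int) := by exact_mod_cast hlt
    rw [List.take_of_length_le (show ((List.take m s).reverse).length ≤ s.length - m by simp; omega)]
    rw [if_pos hlt']
    by_cases hc : (List.take m s).reverse = List.take m (List.drop m s)
    · rw [if_pos hc, if_pos hc]
      have hradm : pvRad s m = min m (s.length - m) := by
        rw [pvRad_eq_min_iff s m (by omega),
          List.take_of_length_le (show ((List.take m s).reverse).length ≤ s.length - m by simp; omega)]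
        exact hc
      have hrad : pvRad s m = m := by omega
      simp [hc, hrad]
      omega
    · rw [if_neg hc, if_neg hc]
  · -- middle split: use the ¬D_ hypothesis
    rw [if_neg (by omega : ¬ ((m:Nat):Int) < (((s.length - m : Nat)):Int)),
        if_neg (by omega : ¬ (((s.length - m : Nat)):Int) < ((m:Nat):Int)),
        List.take_of_length_le (show ((List.take m s).reverse).length ≤ s.length - m by simp; omega),
        List.take_of_length_le (show (List.drop m s).length ≤ m by simp; omega)]
    have hiff := hOK heq
    by_cases hc : List.take m s = List.drop m s
    · rw [if_pos hc, if_pos (hiff.mp hc)]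
      have hradm : pvRad s m = min m (s.length - m) := by
        rw [pvRad_eq_min_iff s m (by omega),
          List.take_of_length_le (show ((List.take m s).reverse).length ≤ s.length - m by simp; omega),
          List.take_of_length_le (show (List.drop m s).length ≤ m by simp; omega)]
        exact hiff.mp hc
      have hrad : pvRad s m = m := by omega
      simp [hc, hrad,
        List.take_of_length_le (show (List.drop m s).length ≤ m by simp; omega)]
      omega
    · rw [if_neg hc, if_neg (fun h => hc (hiff.mpr h))]
  · have hgt' : (((s.length - m : Nat)):Int) < ((m:Nat):Int) := by exact_mod_cast hgt
    rw [if_neg (by omega : ¬ ((m:Nat):Int) < (((s.length - m : Nat)):Int)), if_pos hgt',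
        List.take_of_length_le (show (List.drop m s).length ≤ m by simp; omega)]
    by_cases hc : List.take (s.length - m) (List.take m s).reverse = List.drop m s
    · rw [if_pos hc, if_pos hc]
      have hradm : pvRad s m = min m (s.length - m) := by
        rw [pvRad_eq_min_iff s m (by omega),
          List.take_of_length_le (show (List.drop m s).length ≤ m by simp; omega)]
        exact hc
      have hrad : pvRad s m = s.length - m := by omega
      simp [hc, hrad,
        List.take_of_length_le (show (List.drop m s).length ≤ s.length - m by simp)]
    · rw [if_neg hc, if_neg hc]

theorem pv_hiff (s : List String) (m : Nat) (h2 : m < s.length) (heq : m = s.length - m)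
    (hD : ¬ D_getFolds s) :
    (List.take m s = List.drop m s) ↔ ((List.take m s).reverse = List.drop m s) := by
  unfold D_getFolds at hD
  rw [Classical.not_and_iff_not_or_not, Classical.not_and_iff_not_or_not, not_not] at hD
  have hm2 : s.length / 2 = m := by omega
  have hne : s ≠ [] := by intro h; subst h; simp at h2
  rcases hD with h | h | h
  · omega
  · exact absurd h hne
  · rw [hm2] at h; exact not_not.mp h

theorem pv_main (s : List String) (hD : ¬ D_getFolds s) : getFolds s = getFolds_alt s := by
  rw [getFolds_eq, getFolds_alt_eq]
  apply PySem.List.foldl_congr_mem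
  intro acc i hi
  rw [List.mem_range'_1] at hi
  exact pv_body s acc i (by omega) (by omega) (fun heq => pv_hiff s i (by omega) heq hD)

theorem midA (s : List String) (m : Nat) (h2m : s.length = 2 * m)
    (acc : List (Int × Int × List String)) :
    bodyA s acc (m : Int) =
      if List.take m s = List.drop m s then
        acc ++ [((m : Int) - 1, ((m : Int), List.take m s ++ List.drop m s))]
      else acc := by
  unfold bodyA
  simp only [PySem.List.slice_zero_start, PySem.List.slice_to_natCast,
    PySem.List.slice_from_natCast, PySem.List.slice?_none_none_neg_one, Option.getD_some,
    List.length_take, List.length_drop, Nat.min_eq_left (by omega : m ≤ s.length)]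
  rw [if_neg (by omega : ¬ ((m:Nat):Int) < (((s.length - m : Nat)):Int)),
      if_neg (by omega : ¬ (((s.length - m : Nat)):Int) < ((m:Nat):Int))]
  by_cases hc : List.take m s = List.drop m s
  · rw [if_pos hc, if_pos hc]
    simp [hc]
    all_goals omega
  · rw [if_neg hc, if_neg hc]

theorem midM (s : List String) (m : Nat) (h1 : 1 ≤ m) (h2m : s.length = 2 * m)
    (acc : List (Int × Int × List String)) :
    bodyM s acc m =
      if (List.take m s).reverse = List.drop m s then
        acc ++ [((m : Int) - 1, ((m : Int), List.drop m s ++ List.drop m s))]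
      else acc := by
  unfold bodyM
  have hmin : min m (s.length - m) = m := by omega
  have hiff : pvRad s m = min m (s.length - m) ↔ (List.take m s).reverse = List.drop m s := by
    rw [pvRad_eq_min_iff s m (by omega),
      List.take_of_length_le (show ((List.take m s).reverse).length ≤ s.length - m by simp; omega),
      List.take_of_length_le (show (List.drop m s).length ≤ m by simp; omega)]
  by_cases hc : (List.take m s).reverse = List.drop m s
  · rw [if_pos (hiff.mpr hc), if_pos hc]
    have hrad : pvRad s m = m := by rw [hiff.mpr hc]; omega
    rw [PySem.List.slice_natCast_add]
    simp [hrad, List.take_of_length_le (show (List.drop m s).length ≤ m by simp; omega)]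
  · rw [if_neg (fun h => hc (hiff.mp h)), if_neg hc]

theorem bodyA_extract (s : List String) (l : List Nat) (X : List (Int × Int × List String)) :
    List.foldl (fun d (k : Nat) => bodyA s d (k : Int)) X l =
      X ++ List.foldl (fun d (k : Nat) => bodyA s d (k : Int)) [] l := by
  unfold bodyA
  rw [PySem.List.foldl_append_ite, PySem.List.foldl_append_ite, List.nil_append]

theorem bodyM_extract (s : List String) (l : List Nat) (X : List (Int × Int × List String)) :
    List.foldl (bodyM s) X l = X ++ List.foldl (bodyM s) [] l := by
  unfold bodyM
  rw [PySem.List.foldl_append_ite, PySem.List.foldl_append_ite, List.nil_append]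

theorem pv_tight (s : List String) (hD : D_getFolds s) : getFolds s ≠ getFolds_alt s := by
  obtain ⟨he, hne0, hx⟩ := hD
  have hlen : 0 < s.length := List.length_pos_of_ne_nil hne0
  set m := s.length / 2 with hmdef
  have h2m : s.length = 2 * m := by omega
  have hm1 : 1 ≤ m := by omega
  intro hEq
  rw [getFolds_eq, getFolds_alt_eq] at hEq
  have hsplit : List.range' 1 (s.length - 1) =
      (List.range' 1 (m - 1) ++ [m]) ++ List.range' (m + 1) (s.length - 1 - m) := by
    have e1 : List.range' 1 m = List.range' 1 (m - 1) ++ [m] := by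
      have h := List.range'_concat (step := 1) (s := 1) (n := m - 1)
      simp only [one_mul] at h
      rw [show m - 1 + 1 = m by omega, show 1 + (m - 1) = m by omega] at h
      exact h
    have e2 : List.range' 1 m ++ List.range' (m + 1) (s.length - 1 - m) =
        List.range' 1 (s.length - 1) := by
      have h := List.range'_append (step := 1) (s := 1) (m := m) (n := s.length - 1 - m)
      simp only [one_mul] at h
      rw [show 1 + m = m + 1 by omega, show m + (s.length - 1 - m) = s.length - 1 by omega] at h
      exact h
    rw [← e2, e1]
  rw [hsplit, List.foldl_append, List.foldl_append, List.foldl_append, List.foldl_append] at hEq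
  have hpre : List.foldl (fun d (k : Nat) => bodyA s d (k : Int)) [] (List.range' 1 (m - 1)) =
      List.foldl (bodyM s) [] (List.range' 1 (m - 1)) := by
    apply PySem.List.foldl_congr_mem
    intro acc i hi
    rw [List.mem_range'_1] at hi
    exact pv_body s acc i (by omega) (by omega) (fun hj => absurd hj (by omega))
  have hsuf : List.foldl (fun d (k : Nat) => bodyA s d (k : Int)) [] (List.range' (m + 1) (s.length - 1 - m)) =
      List.foldl (bodyM s) [] (List.range' (m + 1) (s.length - 1 - m)) := by
    apply PySem.List.foldl_congr_mem
    intro acc i hi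
    rw [List.mem_range'_1] at hi
    exact pv_body s acc i (by omega) (by omega) (fun hj => absurd hj (by omega))
  rw [bodyA_extract, bodyM_extract, hsuf, List.foldl_cons, List.foldl_nil, List.foldl_cons,
      List.foldl_nil, midA s m h2m, midM s m hm1 h2m, ← hpre] at hEq
  by_cases hca : List.take m s = List.drop m s <;>
    by_cases hcb : (List.take m s).reverse = List.drop m s
  · exact hx (iff_of_true hca hcb)
  · rw [if_pos hca, if_neg hcb] at hEq
    have hLen := congrArg List.length hEq
    simp at hLen
  · rw [if_neg hca, if_pos hcb] at hEq
    have hLen := congrArg List.length hEq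
    simp at hLen
  · exact hx (iff_of_false hca hcb)

-- ===== VERDICT (by name: the statement is the Claim_ definition above) =====
theorem getFolds_spec : Claim_unchanged_getFolds := by
  intro s _ hD
  exact (pv_main s hD).symm ▸ rfl

theorem getFolds_changed : Claim_changed_getFolds := by
  unfold Claim_changed_getFolds; decide

theorem getFolds_tight : Claim_exact_getFolds := by
  intro s _ hD
  exact pv_tight s hD
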